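-- pv_equiv track=rewrite | github.com/shaoyu12138/CodeOracle | GuaLookup.py | _determine_shiyao
-- ===== SOURCE A (Python) =====
-- def _determine_shiyao(orig_bits: int) -> int:
--     lower = lambda b: b & 0b000111
--     upper = lambda b: (b >> 3) & 0b000111
--     is_pure = lambda b: lower(b) == upper(b)
--     if is_pure(orig_bits):
--         return 6
--     work = orig_bits
--     steps = [[1], [2], [3], [4], [5], [4], [1, 2, 3]]
--     for group in steps:
--         for pos in group:
--             work ^= 1 << (pos - 1)
--         if is_pure(work):
--             return max(group)
--     raise RuntimeError("世爻计算失败：七步内未得纯卦")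
-- ===== SOURCE B (Python) =====
-- def _determine_shiyao(orig_bits: int) -> int:
--     # closed form: the shiyao position depends only on the XOR of the two trigrams
--     d = (orig_bits & 0b111) ^ ((orig_bits >> 3) & 0b111)
--     return [6, 1, 3, 2, 5, 4, 4, 3][d]
-- ===== Notes on version B (the rewrite author's own statement) =====
-- stated objective: simpler
-- what changed: Replaced the 7-step cumulative-XOR simulation (flip lines, retest purity each step) by computing the trigram difference d = lower ^ upper once and returning a direct 8-entry table lookup.
import Mathlib
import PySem

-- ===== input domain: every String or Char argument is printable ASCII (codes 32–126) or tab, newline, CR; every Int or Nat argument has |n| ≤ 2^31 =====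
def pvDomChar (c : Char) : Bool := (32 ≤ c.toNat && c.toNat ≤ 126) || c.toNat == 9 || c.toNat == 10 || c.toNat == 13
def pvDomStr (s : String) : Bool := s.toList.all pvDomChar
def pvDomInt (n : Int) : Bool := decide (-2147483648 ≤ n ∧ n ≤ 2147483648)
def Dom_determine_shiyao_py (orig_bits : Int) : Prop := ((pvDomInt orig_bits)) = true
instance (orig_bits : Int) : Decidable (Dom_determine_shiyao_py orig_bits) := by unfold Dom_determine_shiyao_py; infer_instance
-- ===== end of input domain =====

-- B replaces A's 7-step cumulative-XOR simulation by one trigram-difference index into an 8-entry table (simpler; same O(1) cost).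

-- ===== PORT A =====
-- lower = lambda b: b & 0b000111
def pvLowerA (b : Int) : Int := PySem.Int.band b 7
-- upper = lambda b: (b >> 3) & 0b000111
def pvUpperA (b : Int) : Int := PySem.Int.band (b >>> (3:Nat)) 7
-- is_pure = lambda b: lower(b) == upper(b)
def pvIsPureA (b : Int) : Bool := pvLowerA b == pvUpperA b
-- steps = [[1], [2], [3], [4], [5], [4], [1, 2, 3]]
def pvStepsA : List (List Int) := [[1], [2], [3], [4], [5], [4], [1, 2, 3]]
-- the for-loop over steps; `some v` = `return v`; `none` = falling off the loop (the `raise RuntimeError` line).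
-- `PySem.List.max? group` is Python's `max(group)`; every literal group is nonempty, so its none arm is never taken.
def pvLoopA : Int → List (List Int) → Option Int
  | _, [] => none
  | work, group :: rest =>
      -- for pos in group: work ^= 1 << (pos - 1)   (positions are the literals 1..5, so (pos - 1).toNat is exact)
      let work' := group.foldl (fun w pos => PySem.Int.bxor w ((1:Int) <<< (pos - 1).toNat)) work
      if pvIsPureA work' then PySem.List.max? group (fun y => y) else pvLoopA work' rest
def determine_shiyao_py (orig_bits : Int) : Int :=
  if pvIsPureA orig_bits then 6
  else match pvLoopA orig_bits pvStepsA with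
    | some v => v
    | none => 0   -- Python's RuntimeError arm; unreachable (every trigram difference is resolved within the 7 steps)

-- ===== PORT B =====
def determine_shiyao_py_alt (orig_bits : Int) : Int :=
  -- d = (orig_bits & 0b111) ^ ((orig_bits >> 3) & 0b111)
  let d := PySem.Int.bxor (PySem.Int.band orig_bits 7) (PySem.Int.band (orig_bits >>> (3:Nat)) 7)
  -- [6, 1, 3, 2, 5, 4, 4, 3][d]; d is always in 0..7, so the IndexError arm (none) is unreachable
  (PySem.List.pyGet? [6, 1, 3, 2, 5, 4, 4, 3] d).getD 0

-- ===== PRECONDITION & SPEC =====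
def Spec_determine_shiyao_py (orig_bits : Int) (out : Int) : Prop := out = determine_shiyao_py_alt orig_bits
instance (orig_bits : Int) (out : Int) : Decidable (Spec_determine_shiyao_py orig_bits out) := by unfold Spec_determine_shiyao_py; infer_instance

-- ===== CLAIM (what is proved, stated in full; the proofs are below) =====
def Claim_equal_determine_shiyao_py : Prop := ∀ (orig_bits : Int), Dom_determine_shiyao_py orig_bits → Spec_determine_shiyao_py orig_bits (determine_shiyao_py orig_bits)

-- ===== LEMMAS AND PROOFS =====
-- Both programs read only the low six bits of orig_bits: every primitive is shown to factor
-- through b = 64*q + r with 0 ≤ r < 64, and the residual statement on the 64 residues is decided.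

lemma xor_lt_64 (r c : Nat) (hr : r < 64) (hc : c < 64) : r ^^^ c < 64 := by
  revert hc; revert c; revert hr; revert r; decide

lemma nat_xor_compl (r c : Nat) (hr : r < 64) (hc : c < 64) : (63 - r) ^^^ c = 63 - (r ^^^ c) := by
  revert hc; revert c; revert hr; revert r; decide

lemma nat_xor_split (Q r c : Nat) (hr : r < 64) (hc : c < 64) :
    (64 * Q + r) ^^^ c = 64 * Q + (r ^^^ c) := by
  have hdiv : ((64 * Q + r) ^^^ c) / 2 ^ 6 = (64 * Q + r) / 2 ^ 6 ^^^ c / 2 ^ 6 :=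
    Nat.xor_div_two_pow
  have hmod : ((64 * Q + r) ^^^ c) % 2 ^ 6 = (64 * Q + r) % 2 ^ 6 ^^^ c % 2 ^ 6 :=
    Nat.xor_mod_two_pow
  have e1 : (64 * Q + r) / 2 ^ 6 = Q := by omega
  have e2 : c / 2 ^ 6 = 0 := by omega
  have e3 : (64 * Q + r) % 2 ^ 6 = r := by omega
  have e4 : c % 2 ^ 6 = c := by omega
  rw [e1, e2] at hdiv
  rw [e3, e4] at hmod
  simp only [Nat.xor_zero] at hdiv
  have hlt := xor_lt_64 r c hr hc
  generalize hT : (64 * Q + r) ^^^ c = T at hdiv hmod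
  generalize hU : r ^^^ c = U at hmod hlt ⊢
  omega

lemma band7 (k : Int) (s : Nat) (hs : s < 8) : PySem.Int.band (8 * k + (s : Int)) 7 = (s : Int) := by
  unfold PySem.Int.band
  split_ifs with h1 h2 h2
  · -- 0 ≤ 8k+s, 0 ≤ 7
    have htn : (8 * k + (s : Int)).toNat = 8 * k.toNat + s := by omega
    rw [htn]
    have h7 : (7:Int).toNat = 2 ^ 3 - 1 := by decide
    rw [h7, Nat.and_two_pow_sub_one_eq_mod]
    have : (8 * k.toNat + s) % 2 ^ 3 = s := by omega
    rw [this]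
  · exact absurd (by norm_num : (0:Int) ≤ 7) h2
  · -- 8k+s < 0, 0 ≤ 7
    have hm : (-(8 * k + (s:Int)) - 1).toNat = 8 * (-k - 1).toNat + (7 - s) := by omega
    rw [hm]
    have h7 : (7:Int).toNat = 2 ^ 3 - 1 := by decide
    rw [h7, Nat.and_comm, Nat.and_two_pow_sub_one_eq_mod]
    have : (8 * (-k - 1).toNat + (7 - s)) % 2 ^ 3 = 7 - s := by omega
    rw [this]
    omega
  · exact absurd (by norm_num : (0:Int) ≤ 7) h2

lemma shiftRight3_split (q : Int) (r : Nat) (hr : r < 64) :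
    (64 * q + (r : Int)) >>> (3:Nat) = 8 * q + ((r / 8 : Nat) : Int) := by
  by_cases hq : 0 ≤ q
  · obtain ⟨n, hn⟩ := Int.eq_ofNat_of_zero_le hq
    have hb : 64 * q + (r : Int) = ((64 * n + r : Nat) : Int) := by rw [hn]; push_cast; ring
    rw [hb]
    show (((64 * n + r) >>> 3 : Nat) : Int) = _
    rw [Nat.shiftRight_eq_div_pow]
    have : (64 * n + r) / 2 ^ 3 = 8 * n + r / 8 := by omega
    rw [this, hn]
    push_cast; ring
  · have hb : 64 * q + (r : Int) = Int.negSucc (64 * (-q - 1).toNat + (63 - r)) := by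
      rw [Int.negSucc_eq]; push_cast; omega
    rw [hb]
    show Int.negSucc ((64 * (-q - 1).toNat + (63 - r)) >>> 3) = _
    rw [Nat.shiftRight_eq_div_pow]
    have : (64 * (-q - 1).toNat + (63 - r)) / 2 ^ 3 = 8 * (-q - 1).toNat + (7 - r / 8) := by omega
    rw [this, Int.negSucc_eq]
    push_cast; omega

lemma bxor_split (q : Int) (r c : Nat) (hr : r < 64) (hc : c < 64) :
    PySem.Int.bxor (64 * q + (r : Int)) (c : Int) = 64 * q + ((r ^^^ c : Nat) : Int) := by
  have hx := xor_lt_64 r c hr hc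
  unfold PySem.Int.bxor
  split_ifs with h1 h2 h2
  · have htn : (64 * q + (r : Int)).toNat = 64 * q.toNat + r := by omega
    rw [htn, Int.toNat_natCast, nat_xor_split _ _ _ hr hc]
    omega
  · exact absurd (Int.natCast_nonneg c) h2
  · have hm : (-(64 * q + (r:Int)) - 1).toNat = 64 * (-q - 1).toNat + (63 - r) := by omega
    rw [hm, Int.toNat_natCast, nat_xor_split _ _ _ (by omega) hc, nat_xor_compl _ _ hr hc]
    omega
  · exact absurd (Int.natCast_nonneg c) h2

lemma lower_shift (q : Int) (s : Nat) (hs : s < 64) :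
    pvLowerA (64 * q + (s : Int)) = ((s % 8 : Nat) : Int) := by
  unfold pvLowerA
  have hb : 64 * q + (s : Int) = 8 * (8 * q + ((s / 8 : Nat) : Int)) + ((s % 8 : Nat) : Int) := by
    push_cast; omega
  rw [hb, band7 _ _ (by omega)]

lemma upper_shift (q : Int) (s : Nat) (hs : s < 64) :
    pvUpperA (64 * q + (s : Int)) = ((s / 8 : Nat) : Int) := by
  unfold pvUpperA
  rw [shiftRight3_split q s hs, band7 q _ (by omega)]

lemma pure_shift (q : Int) (s : Nat) (hs : s < 64) :
    pvIsPureA (64 * q + (s : Int)) = pvIsPureA ((s : Int)) := by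
  have h0 : (s : Int) = 64 * (0:Int) + (s : Int) := by ring
  unfold pvIsPureA
  rw [lower_shift q s hs, upper_shift q s hs, h0, lower_shift 0 s hs, upper_shift 0 s hs]

-- the body of A's inner `for pos in group` loop
def pvF : Int → Int → Int := fun w pos => PySem.Int.bxor w ((1:Int) <<< (((pos - 1).toNat : Nat) : Int))

lemma fold_shift (q : Int) : ∀ (g : List Int), (∀ p ∈ g, p = 1 ∨ p = 2 ∨ p = 3 ∨ p = 4 ∨ p = 5) →
    ∀ (s : Nat), s < 64 →
    ∃ t : Nat, t < 64 ∧ g.foldl pvF (64 * q + (s : Int)) = 64 * q + (t : Int) ∧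
      g.foldl pvF ((s : Int)) = (t : Int)
  | [], _, s, hs => ⟨s, hs, rfl, rfl⟩
  | p :: g, hg, s, hs => by
    have hp := hg p (List.mem_cons_self ..)
    have hg' : ∀ x ∈ g, x = 1 ∨ x = 2 ∨ x = 3 ∨ x = 4 ∨ x = 5 := by
      intro x hx; exact hg x (List.mem_cons_of_mem _ hx)
    obtain ⟨c, hc, hcv⟩ : ∃ c : Nat, c < 64 ∧ (1:Int) <<< (((p - 1).toNat : Nat) : Int) = (c : Int) := by
      rcases hp with h | h | h | h | h <;> subst h
      · exact ⟨1, by norm_num, by decide⟩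
      · exact ⟨2, by norm_num, by decide⟩
      · exact ⟨4, by norm_num, by decide⟩
      · exact ⟨8, by norm_num, by decide⟩
      · exact ⟨16, by norm_num, by decide⟩
    have hstep1 : pvF (64 * q + (s : Int)) p = 64 * q + ((s ^^^ c : Nat) : Int) := by
      unfold pvF; rw [hcv]; exact bxor_split q s c hs hc
    have hstep0 : pvF ((s : Int)) p = ((s ^^^ c : Nat) : Int) := by
      unfold pvF; rw [hcv]
      have := bxor_split 0 s c hs hc
      simpa using this
    obtain ⟨t, ht, h1, h0⟩ := fold_shift q g hg' (s ^^^ c) (xor_lt_64 s c hs hc)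
    exact ⟨t, ht, by simpa [List.foldl, hstep1] using h1, by simpa [List.foldl, hstep0] using h0⟩

lemma loop_shift (q : Int) : ∀ (L : List (List Int)),
    (∀ g ∈ L, ∀ p ∈ g, p = 1 ∨ p = 2 ∨ p = 3 ∨ p = 4 ∨ p = 5) →
    ∀ (s : Nat), s < 64 → pvLoopA (64 * q + (s : Int)) L = pvLoopA ((s : Int)) L
  | [], _, s, hs => rfl
  | g :: L, hL, s, hs => by
    have hg := hL g (List.mem_cons_self ..)
    have hL' : ∀ x ∈ L, ∀ p ∈ x, p = 1 ∨ p = 2 ∨ p = 3 ∨ p = 4 ∨ p = 5 := by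
      intro x hx; exact hL x (List.mem_cons_of_mem _ hx)
    obtain ⟨t, ht, h1, h0⟩ := fold_shift q g hg s hs
    have hf : (fun w pos => PySem.Int.bxor w ((1:Int) <<< (pos - 1).toNat)) = pvF := by
      funext w pos; rfl
    simp only [pvLoopA, hf]
    rw [h1, h0, pure_shift q t ht]
    split
    · rfl
    · exact loop_shift q L hL' t ht

lemma A_residue (q : Int) (s : Nat) (hs : s < 64) :
    determine_shiyao_py (64 * q + (s : Int)) = determine_shiyao_py ((s : Int)) := by
  have hsteps : ∀ g ∈ pvStepsA, ∀ p ∈ g, p = 1 ∨ p = 2 ∨ p = 3 ∨ p = 4 ∨ p = 5 := by decide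
  unfold determine_shiyao_py
  rw [pure_shift q s hs, loop_shift q pvStepsA hsteps s hs]

lemma B_residue (q : Int) (s : Nat) (hs : s < 64) :
    determine_shiyao_py_alt (64 * q + (s : Int)) = determine_shiyao_py_alt ((s : Int)) := by
  have h0 : (s : Int) = 64 * (0:Int) + (s : Int) := by ring
  unfold determine_shiyao_py_alt
  rw [shiftRight3_split q s hs, band7 q _ (by omega)]
  have hb : 64 * q + (s : Int) = 8 * (8 * q + ((s / 8 : Nat) : Int)) + ((s % 8 : Nat) : Int) := by
    push_cast; omega
  rw [hb, band7 _ _ (by omega)]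
  conv_rhs => rw [h0, shiftRight3_split 0 s hs, band7 0 _ (by omega)]
  have hb0 : 64 * (0:Int) + (s : Int) = 8 * (8 * (0:Int) + ((s / 8 : Nat) : Int)) + ((s % 8 : Nat) : Int) := by
    push_cast; omega
  conv_rhs => rw [hb0, band7 _ _ (by omega)]

lemma residues : ∀ s : Nat, s < 64 → determine_shiyao_py ((s : Int)) = determine_shiyao_py_alt ((s : Int)) := by
  decide

-- ===== VERDICT (by name: the statement is the Claim_ definition above) =====
theorem determine_shiyao_py_spec : Claim_equal_determine_shiyao_py := by
  intro b _
  unfold Spec_determine_shiyao_py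
  have hr : (b % 64).toNat < 64 := by omega
  have hb : b = 64 * (b / 64) + ((b % 64).toNat : Int) := by omega
  rw [hb, A_residue _ _ hr, B_residue _ _ hr]
  exact residues _ hr
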